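-- pv_equiv track=rewrite | github.com/leejiho1996/forCodingTest | 프로그래머스/3/138475. 억억단을 외우자/억억단을 외우자.py | solution
-- ===== SOURCE A (Python) =====
-- def solution(e, starts):
--     answer = []
--     yaksu = [2] * (e + 1)
--     yaksu[1] -= 1
--
--     for i in range(2, e+1):
--         start = i*2
--
--         while start <= e:
--             yaksu[start] += 1
--             start += i
--
--     result = [0] * (e + 1)
--
--     maxx = 0
--     cnt = 0
--     for i in range(e, 0, -1):
--         if cnt <= yaksu[i]:
--             cnt = yaksu[i]
--             maxx = i
--
--         result[i] = maxx
--
--     for i in starts: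
--         answer.append(result[i])
--
--     return answer
-- ===== SOURCE B (Python) =====
-- def solution(e, starts):
--     d = [0] * (e + 1)
--     a = 1
--     while a * a <= e:
--         d[a * a] += 1
--         for b in range(a + 1, e // a + 1):
--             d[a * b] += 2
--         a += 1
--     result = [0] * (e + 1)
--     top = 0
--     for i in range(e, 0, -1):
--         if d[top] <= d[i]:
--             top = i
--         result[i] = top
--     return [result[s] for s in starts]
-- ===== Notes on version B (the rewrite author's own statement) =====
-- stated objective: faster
-- what changed: A's harmonic divisor sieve (for each i >= 2, walk all multiples 2i, 3i, ... <= e adding 1) is replaced by a factor-pair half sieve: for each a with a*a <= e add 1 at a*a and 2 at a*b for b in (a, e//a], doing roughly half the array updates; the suffix-max pass keeps a single best-index accumulator and queries are answered by one map.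
-- outside the precondition, e.g. on solution(0, [0]): A raises IndexError, B returns [0]; on solution(3, [4]): A raises IndexError, B raises IndexError
import Mathlib
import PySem

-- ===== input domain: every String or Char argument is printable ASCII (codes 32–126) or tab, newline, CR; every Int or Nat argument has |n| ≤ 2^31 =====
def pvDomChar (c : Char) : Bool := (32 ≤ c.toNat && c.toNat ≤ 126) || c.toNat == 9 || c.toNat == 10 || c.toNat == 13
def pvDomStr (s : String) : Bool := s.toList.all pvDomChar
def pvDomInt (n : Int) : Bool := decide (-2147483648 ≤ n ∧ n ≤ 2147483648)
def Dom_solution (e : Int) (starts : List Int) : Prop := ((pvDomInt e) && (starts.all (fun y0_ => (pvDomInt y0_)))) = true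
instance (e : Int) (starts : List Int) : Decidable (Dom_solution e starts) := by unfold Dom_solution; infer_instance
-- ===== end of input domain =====

-- B replaces A's harmonic multiple-sweep divisor sieve by a factor-pair half sieve
-- (a ≤ √e, pairs (a,b) with b in (a, e//a]), doing roughly half the array updates; suffix-max pass kept.

-- ===== PORT A =====
-- xs[j] += v  (Python augmented assignment on a list entry)
def pvBump (xs : List Int) (j v : Int) : List Int :=
  PySem.List.pySetD xs j (PySem.List.pyGetD xs j 0 + v)

-- the inner `while start <= e: yaksu[start] += 1; start += i` (the conjunct `1 ≤ i` is only for
-- termination; every call made by pvYaksu has i ≥ 2)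
def pvWhileA (e i start : Int) (ys : List Int) : List Int :=
  if h : start ≤ e ∧ 1 ≤ i then pvWhileA e i (start + i) (pvBump ys start 1) else ys
termination_by (e + 1 - start).toNat
decreasing_by omega

-- `yaksu = [2] * (e+1); yaksu[1] -= 1; for i in range(2, e+1): <while>`
def pvYaksu (e : Int) : List Int :=
  (PySem.List.pyRange 2 (e + 1) 1).foldl (fun ys i => pvWhileA e i (i * 2) ys)
    (pvBump (PySem.List.pyRepeat [2] (e + 1)) 1 (-1))

-- `result = [0]*(e+1); maxx = cnt = 0; for i in range(e, 0, -1): ...` (state: result, maxx, cnt)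
def pvSuffixA (ys : List Int) (e : Int) : List Int × Int × Int :=
  (PySem.List.pyRange e 0 (-1)).foldl
    (fun st i =>
      if st.2.2 ≤ PySem.List.pyGetD ys i 0 then
        (PySem.List.pySetD st.1 i i, i, PySem.List.pyGetD ys i 0)
      else
        (PySem.List.pySetD st.1 i st.2.1, st.2.1, st.2.2))
    (PySem.List.pyRepeat [0] (e + 1), 0, 0)

def solution (e : Int) (starts : List Int) : List Int :=
  starts.foldl (fun ans s => ans ++ [PySem.List.pyGetD (pvSuffixA (pvYaksu e) e).1 s 0]) []

-- ===== PORT B =====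
-- the inner `for b in range(a+1, e//a + 1): d[a*b] += 2`
def pvForB (e a : Int) (ds : List Int) : List Int :=
  (PySem.List.pyRange (a + 1) (PySem.Int.floordiv e a + 1) 1).foldl
    (fun ds b => pvBump ds (a * b) 2) ds

-- the outer `while a*a <= e: d[a*a] += 1; <inner for>; a += 1` (the conjunct `1 ≤ a` is only for
-- termination; a starts at 1)
def pvWhileB (e a : Int) (ds : List Int) : List Int :=
  if h : a * a ≤ e ∧ 1 ≤ a then pvWhileB e (a + 1) (pvForB e a (pvBump ds (a * a) 1)) else ds
termination_by (e + 1 - a).toNat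
decreasing_by
  have : a ≤ a * a := le_mul_of_one_le_left (by omega) h.2
  omega

-- `d = [0]*(e+1); a = 1; <while>`
def pvD (e : Int) : List Int := pvWhileB e 1 (PySem.List.pyRepeat [0] (e + 1))

-- `result = [0]*(e+1); top = 0; for i in range(e, 0, -1): if d[top] <= d[i]: top = i; result[i] = top`
def pvSuffixB (ds : List Int) (e : Int) : List Int × Int :=
  (PySem.List.pyRange e 0 (-1)).foldl
    (fun st i =>
      if PySem.List.pyGetD ds st.2 0 ≤ PySem.List.pyGetD ds i 0 then
        (PySem.List.pySetD st.1 i i, i)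
      else
        (PySem.List.pySetD st.1 i st.2, st.2))
    (PySem.List.pyRepeat [0] (e + 1), 0)

def solution_alt (e : Int) (starts : List Int) : List Int :=
  starts.map (fun s => PySem.List.pyGetD (pvSuffixB (pvD e) e).1 s 0)

-- ===== PRECONDITION & SPEC =====
-- Pre_ excludes exactly the inputs where Python A raises IndexError: e ≤ 0 (the write `yaksu[1] -= 1`
-- on a list shorter than 2) and query values outside Python's accepted index range [-(e+1), e] for
-- the final lookup `result[i]`.
def Pre_solution (e : Int) (starts : List Int) : Prop :=
  1 ≤ e ∧ ∀ s ∈ starts, -(e + 1) ≤ s ∧ s ≤ e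
instance (e : Int) (starts : List Int) : Decidable (Pre_solution e starts) := by
  unfold Pre_solution; infer_instance

def pvWitness_solution : Int × List Int := (6, [1, 2, 3, 6, -1, 0])

def Spec_solution (e : Int) (starts : List Int) (out : List Int) : Prop := out = solution_alt e starts
instance (e : Int) (starts : List Int) (out : List Int) : Decidable (Spec_solution e starts out) := by
  unfold Spec_solution; infer_instance

-- ===== CLAIM (what is proved, stated in full; the proofs are below) =====
def Claim_equal_solution : Prop := ∀ (e : Int) (starts : List Int), Dom_solution e starts → Pre_solution e starts → Spec_solution e starts (solution e starts)

-- ===== LEMMAS AND PROOFS =====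

-- fold a list of (index, weight) increment events over an array
def pvApply (xs : List Int) (evs : List (Int × Int)) : List Int :=
  evs.foldl (fun a p => pvBump a p.1 p.2) xs

-- the list of indices visited by A's inner while loop
def pvMults (e i start : Int) : List Int :=
  if h : start ≤ e ∧ 1 ≤ i then start :: pvMults e i (start + i) else []
termination_by (e + 1 - start).toNat
decreasing_by omega

-- the list of values `a` visited by B's outer while loop
def pvRoots (e a : Int) : List Int :=
  if h : a * a ≤ e ∧ 1 ≤ a then a :: pvRoots e (a + 1) else []
termination_by (e + 1 - a).toNat
decreasing_by
  have : a ≤ a * a := le_mul_of_one_le_left (by omega) h.2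
  omega

def pvEvsA (e : Int) : List (Int × Int) :=
  (PySem.List.pyRange 2 (e + 1) 1).flatMap (fun i => (pvMults e i (i * 2)).map (fun m => (m, 1)))

def pvEvsB (e : Int) : List (Int × Int) :=
  (pvRoots e 1).flatMap (fun a =>
    (a * a, 1) :: (PySem.List.pyRange (a + 1) (PySem.Int.floordiv e a + 1) 1).map (fun b => (a * b, 2)))

-- number of divisors of n among [1, e]
def pvTau (e n : Int) : Int := ((PySem.List.pyRange 1 (e + 1) 1).countP (fun d => decide (d ∣ n)) : Int)

theorem pvBump_length (xs : List Int) (j v : Int) : (pvBump xs j v).length = xs.length := by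
  simp [pvBump, PySem.List.length_pySetD]

theorem pvApply_getD (evs : List (Int × Int)) (xs : List Int) (n : Int) (h0 : 0 ≤ n)
    (hlen : n < xs.length) (hpos : ∀ p ∈ evs, 0 ≤ p.1) :
    PySem.List.pyGetD (pvApply xs evs) n 0
      = PySem.List.pyGetD xs n 0 + ((evs.filter (fun p => p.1 == n)).map Prod.snd).sum := by
  induction evs generalizing xs with
  | nil => simp [pvApply]
  | cons p t ih =>
    have hp : 0 ≤ p.1 := hpos p (by simp)
    have hlen' : n < ((pvBump xs p.1 p.2).length : Int) := by rw [pvBump_length]; exact hlen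
    have step := ih (pvBump xs p.1 p.2) hlen' (fun q hq => hpos q (by simp [hq]))
    show PySem.List.pyGetD (pvApply (pvBump xs p.1 p.2) t) n 0 = _
    rw [step]
    by_cases hpn : p.1 = n
    · subst hpn
      have : PySem.List.pyGetD (pvBump xs p.1 p.2) p.1 0 = PySem.List.pyGetD xs p.1 0 + p.2 := by
        rw [pvBump, PySem.List.pySetD_of_nonneg _ _ hp, PySem.List.pyGetD_of_nonneg _ _ hp,
            PySem.List.pyGetD_of_nonneg _ _ hp, List.getD_eq_getElem?_getD, List.getD_eq_getElem?_getD,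
            List.getElem?_set_self]
        · simp [List.getD_eq_getElem?_getD]
        · omega
      rw [this]; simp [List.filter_cons]; ring
    · have : PySem.List.pyGetD (pvBump xs p.1 p.2) n 0 = PySem.List.pyGetD xs n 0 := by
        rw [pvBump, PySem.List.pySetD_of_nonneg _ _ hp, PySem.List.pyGetD_of_nonneg _ _ h0,
            PySem.List.pyGetD_of_nonneg _ _ h0, List.getD_eq_getElem?_getD, List.getD_eq_getElem?_getD,
            List.getElem?_set_ne (by omega)]
      rw [this]; simp [List.filter_cons, hpn]

theorem pvApply_flatMap {α : Type} (L : List α) (F : α → List (Int × Int)) (xs : List Int) :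
    L.foldl (fun ys a => pvApply ys (F a)) xs = pvApply xs (L.flatMap F) := by
  induction L generalizing xs with
  | nil => rfl
  | cons a t ih => simp [List.flatMap_cons, pvApply, List.foldl_append] at *; rw [ih]

theorem pvWhileA_eq (e i start : Int) (ys : List Int) :
    pvWhileA e i start ys = pvApply ys ((pvMults e i start).map (fun m => (m, 1))) := by
  fun_induction pvWhileA e i start ys with
  | case1 start ys h ih =>
    rw [pvMults, dif_pos h]
    simpa [pvApply] using ih
  | case2 start ys h =>
    rw [pvMults, dif_neg h]
    rfl

theorem pvYaksu_eq (e : Int) :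
    pvYaksu e = pvApply (pvBump (PySem.List.pyRepeat [2] (e + 1)) 1 (-1)) (pvEvsA e) := by
  unfold pvYaksu pvEvsA
  rw [← pvApply_flatMap]
  apply PySem.List.foldl_congr_mem
  intro ys i _
  exact pvWhileA_eq e i (i * 2) ys

theorem pvWhileB_eq (e a : Int) (ds : List Int) :
    pvWhileB e a ds
      = pvApply ds ((pvRoots e a).flatMap (fun a =>
          (a * a, 1) :: (PySem.List.pyRange (a + 1) (PySem.Int.floordiv e a + 1) 1).map
            (fun b => (a * b, 2)))) := by
  fun_induction pvWhileB e a ds with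
  | case1 a ds h ih =>
    rw [pvRoots, dif_pos h, List.flatMap_cons]
    have happ : ∀ (l1 l2 : List (Int × Int)) (xs : List Int),
        pvApply xs (l1 ++ l2) = pvApply (pvApply xs l1) l2 := by
      intro l1 l2 xs; simp [pvApply, List.foldl_append]
    rw [happ]
    have hbody : pvApply ds ((a * a, (1:Int)) ::
        (PySem.List.pyRange (a + 1) (PySem.Int.floordiv e a + 1) 1).map (fun b => (a * b, (2:Int))))
        = pvForB e a (pvBump ds (a * a) 1) := by
      simp only [pvApply, List.foldl_cons, List.foldl_map]
      rfl
    rw [hbody, ih]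
  | case2 a ds h =>
    rw [pvRoots, dif_neg h]
    rfl

theorem pvD_eq (e : Int) : pvD e = pvApply (PySem.List.pyRepeat [0] (e + 1)) (pvEvsB e) := by
  unfold pvD pvEvsB
  exact pvWhileB_eq e 1 _

theorem pvMults_countP (e i start n : Int) (hi : 1 ≤ i) :
    ((pvMults e i start).countP (fun m => m == n))
      = if start ≤ n ∧ n ≤ e ∧ i ∣ (n - start) then 1 else 0 := by
  fun_induction pvMults e i start with
  | case1 start h ih =>
    rw [List.countP_cons]
    rw [ih]
    by_cases hn : start = n
    · subst hn
      have h2 : ¬ (start + i ≤ start ∧ start ≤ e ∧ i ∣ (start - (start + i))) := by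
        rintro ⟨h1, -, -⟩; omega
      simp [h2, h.1]
      omega
    · have hiff : (start + i ≤ n ∧ n ≤ e ∧ i ∣ (n - (start + i))) ↔
          (start ≤ n ∧ n ≤ e ∧ i ∣ (n - start)) := by
        constructor
        · rintro ⟨h1, h2, h3⟩
          refine ⟨by omega, h2, ?_⟩
          have : n - start = (n - (start + i)) + i := by ring
          rw [this]; exact dvd_add h3 dvd_rfl
        · rintro ⟨h1, h2, h3⟩
          have h3' : i ∣ (n - (start + i)) := by
            have : n - (start + i) = (n - start) - i := by ring
            rw [this]; exact dvd_sub h3 dvd_rfl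
          refine ⟨?_, h2, h3'⟩
          rcases h3 with ⟨k, hk⟩
          have hlt : start < n := by omega
          have hik : 0 < i * k := by omega
          have hk1 : 1 ≤ k := by nlinarith [hik, hi]
          nlinarith [hk, hk1, hi]
      simp [hn, hiff]
  | case2 start h =>
    have : ¬ (start ≤ n ∧ n ≤ e ∧ i ∣ (n - start)) := by
      rintro ⟨h1, h2, -⟩; exact h ⟨by omega, hi⟩
    simp [this]

theorem pvRoots_eq (e a : Int) (ha : 1 ≤ a) :
    pvRoots e a = (PySem.List.pyRange a (e + 1) 1).filter (fun x => decide (x * x ≤ e)) := by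
  fun_induction pvRoots e a with
  | case1 a h ih =>
    have hae : a ≤ e := le_trans (le_mul_of_one_le_left (by omega) h.2) h.1
    rw [PySem.List.pyRange_one_cons (by omega), List.filter_cons]
    simp only [h.1, decide_true, if_true]
    rw [ih (by omega)]
  | case2 a h =>
    have h2 : e < a * a := by
      rcases lt_or_ge e (a * a) with h' | h'
      · exact h'
      · exact absurd ⟨h', ha⟩ h
    symm
    rw [List.filter_eq_nil_iff]
    intro x hx
    rw [PySem.List.mem_pyRange_one] at hx
    simp only [decide_eq_true_eq, not_le]
    nlinarith [hx.1, ha]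

theorem pvCountP_split {α : Type} (l : List α) (p q : α → Bool) :
    l.countP p = l.countP (fun x => p x && q x) + l.countP (fun x => p x && !q x) := by
  induction l with
  | nil => rfl
  | cons x t ih =>
    simp only [List.countP_cons, ih]
    cases hp : p x <;> cases hq : q x <;> simp [hp, hq] <;> omega

theorem pvInnerCnt (a n lo hi : Int) (ha : 1 ≤ a) :
    ((PySem.List.pyRange lo hi 1).countP (fun b => a * b == n))
      = if a ∣ n ∧ lo ≤ n / a ∧ n / a < hi then 1 else 0 := by
  by_cases hd : a ∣ n
  · rcases hd with ⟨k, hk⟩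
    have ha0 : a ≠ 0 := by omega
    have hnk : n / a = k := by rw [hk]; exact Int.mul_ediv_cancel_left k ha0
    have hcong : (PySem.List.pyRange lo hi 1).countP (fun b => a * b == n)
        = (PySem.List.pyRange lo hi 1).countP (fun b => b == k) := by
      apply List.countP_congr
      intro x _
      constructor
      · intro hx
        have : a * x = n := by simpa using hx
        have : x = k := by
          have := this.trans hk
          exact mul_left_cancel₀ ha0 this
        simp [this]
      · intro hx
        have : x = k := by simpa using hx
        subst this
        simp [hk.symm]
    rw [hcong, hnk]
    have hmem := PySem.List.mem_pyRange_one (a := lo) (b := hi) (x := k)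
    by_cases hin : lo ≤ k ∧ k < hi
    · rw [if_pos ⟨⟨k, hk⟩, hin.1, hin.2⟩]
      rw [← List.count_eq_countP]
      exact List.count_eq_one_of_mem (PySem.List.nodup_pyRange_one lo hi) (hmem.mpr hin)
    · rw [if_neg (by rintro ⟨-, h1, h2⟩; exact hin ⟨h1, h2⟩)]
      rw [← List.count_eq_countP]
      exact List.count_eq_zero.mpr (fun hc => hin (hmem.mp hc))
  · rw [if_neg (by rintro ⟨h1, -⟩; exact hd h1)]
    rw [List.countP_eq_zero]
    intro x _
    simp only [beq_iff_eq]
    intro hx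
    exact hd ⟨x, hx.symm⟩

theorem pvPairs_countP (e n : Int) (hn1 : 1 ≤ n) (hne : n ≤ e) :
    (PySem.List.pyRange 1 (e + 1) 1).countP (fun d => decide (d ∣ n ∧ d * d < n))
      = (PySem.List.pyRange 1 (e + 1) 1).countP (fun d => decide (d ∣ n ∧ n < d * d)) := by
  set l := PySem.List.pyRange 1 (e + 1) 1 with hl
  have hnodup : l.Nodup := PySem.List.nodup_pyRange_one 1 (e + 1)
  have hmem : ∀ x : Int, x ∈ l ↔ 1 ≤ x ∧ x < e + 1 := fun x => PySem.List.mem_pyRange_one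
  rw [List.countP_eq_length_filter, List.countP_eq_length_filter]
  rw [← List.toFinset_card_of_nodup (List.Nodup.filter _ hnodup),
      ← List.toFinset_card_of_nodup (List.Nodup.filter _ hnodup)]
  -- the map d ↦ n / d is a bijection between small and large divisors
  have key : ∀ d : Int, d ∈ l → d ∣ n → (1 ≤ n / d ∧ n / d ∣ n ∧ n / d ∈ l ∧ n / (n / d) = d ∧
      n = d * (n / d)) := by
    intro d hd hdvd
    rw [hmem] at hd
    have hd0 : d ≠ 0 := by omega
    obtain ⟨k, hk⟩ := hdvd
    have hnk : n / d = k := by rw [hk]; exact Int.mul_ediv_cancel_left k hd0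
    have hk1 : 1 ≤ k := by nlinarith [hk, hd.1, hn1]
    have hk0 : k ≠ 0 := by omega
    refine ⟨by omega, ⟨d, by rw [hnk, hk]; ring⟩, ?_, ?_, by rw [hnk]; exact hk⟩
    · rw [hnk, hmem]
      have : k ≤ n := Int.le_of_dvd (by omega) ⟨d, by rw [hk]; ring⟩
      constructor <;> omega
    · rw [hnk, hk]
      rw [mul_comm]
      exact Int.mul_ediv_cancel_left d hk0
  apply Finset.card_nbij' (fun d => n / d) (fun d => n / d)
  · intro d hd
    simp only [Finset.mem_coe, List.mem_toFinset, List.mem_filter, decide_eq_true_eq] at hd ⊢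
    obtain ⟨hdl, hdvd, hsm⟩ := hd
    obtain ⟨hk1, hkdvd, hkl, hinv, hprod⟩ := key d hdl hdvd
    refine ⟨hkl, hkdvd, ?_⟩
    have hd1 : 1 ≤ d := ((hmem d).mp hdl).1
    have hdk : d < n / d := by nlinarith [hprod]
    nlinarith [hprod]
  · intro d hd
    simp only [Finset.mem_coe, List.mem_toFinset, List.mem_filter, decide_eq_true_eq] at hd ⊢
    obtain ⟨hdl, hdvd, hsm⟩ := hd
    obtain ⟨hk1, hkdvd, hkl, hinv, hprod⟩ := key d hdl hdvd
    refine ⟨hkl, hkdvd, ?_⟩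
    have hd1 : 1 ≤ d := ((hmem d).mp hdl).1
    have hdk : n / d < d := by nlinarith [hprod]
    nlinarith [hprod]
  · intro d hd
    simp only [Finset.mem_coe, List.mem_toFinset, List.mem_filter, decide_eq_true_eq] at hd
    exact (key d hd.1 hd.2.1).2.2.2.1
  · intro d hd
    simp only [Finset.mem_coe, List.mem_toFinset, List.mem_filter, decide_eq_true_eq] at hd
    exact (key d hd.1 hd.2.1).2.2.2.1


theorem pvFlatSum {α : Type} (L : List α) (F : α → List (Int × Int)) (n : Int) :
    (((L.flatMap F).filter (fun p => p.1 == n)).map Prod.snd).sum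
      = (L.map (fun a => (((F a).filter (fun p => p.1 == n)).map Prod.snd).sum)).sum := by
  induction L with
  | nil => rfl
  | cons a t ih =>
    simp only [List.flatMap_cons, List.filter_append, List.map_append, List.sum_append, ih,
      List.map_cons, List.sum_cons]

theorem pvMults_mem (e i start : Int) : ∀ m ∈ pvMults e i start, start ≤ m := by
  fun_induction pvMults e i start with
  | case1 start h ih =>
    intro m hm
    rcases List.mem_cons.mp hm with h' | h'
    · omega
    · have := ih m h'
      omega
  | case2 start h => intro m hm; simp at hm

theorem pvRoots_mem (e : Int) : ∀ a ∈ pvRoots e 1, 1 ≤ a ∧ a * a ≤ e := by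
  intro a ha
  rw [pvRoots_eq e 1 le_rfl, List.mem_filter] at ha
  rw [PySem.List.mem_pyRange_one] at ha
  exact ⟨ha.1.1, by simpa using ha.2⟩

theorem pvEvsA_pos (e : Int) : ∀ p ∈ pvEvsA e, 1 ≤ p.1 := by
  intro p hp
  rw [pvEvsA, List.mem_flatMap] at hp
  obtain ⟨i, hi, hpi⟩ := hp
  rw [PySem.List.mem_pyRange_one] at hi
  rw [List.mem_map] at hpi
  obtain ⟨m, hm, rfl⟩ := hpi
  have := pvMults_mem e i (i * 2) m hm
  omega

theorem pvEvsB_pos (e : Int) : ∀ p ∈ pvEvsB e, 1 ≤ p.1 := by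
  intro p hp
  rw [pvEvsB, List.mem_flatMap] at hp
  obtain ⟨a, ha, hpa⟩ := hp
  obtain ⟨ha1, -⟩ := pvRoots_mem e a ha
  rcases List.mem_cons.mp hpa with rfl | hpa
  · simpa using one_le_mul_of_one_le_of_one_le ha1 ha1
  · rw [List.mem_map] at hpa
    obtain ⟨b, hb, rfl⟩ := hpa
    rw [PySem.List.mem_pyRange_one] at hb
    have hb1 : 1 ≤ b := by omega
    simpa using one_le_mul_of_one_le_of_one_le ha1 hb1

theorem pvEvsA_sum (e n : Int) (hne : n ≤ e) :
    (((pvEvsA e).filter (fun p => p.1 == n)).map Prod.snd).sum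
      = ((PySem.List.pyRange 2 (e + 1) 1).countP (fun i => decide (i ∣ n ∧ 2 * i ≤ n)) : Int) := by
  rw [pvEvsA, pvFlatSum]
  have step : (PySem.List.pyRange 2 (e + 1) 1).map
        (fun i => ((((pvMults e i (i * 2)).map (fun m => ((m : Int), (1 : Int)))).filter
          (fun p => p.1 == n)).map Prod.snd).sum)
      = (PySem.List.pyRange 2 (e + 1) 1).map
        (fun i => if decide (i ∣ n ∧ 2 * i ≤ n) then (1 : Int) else 0) := by
    apply List.map_congr_left
    intro i hi
    rw [PySem.List.mem_pyRange_one] at hi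
    have hi1 : 1 ≤ i := by omega
    rw [List.filter_map, List.map_map]
    rw [show ((fun (p : Int × Int) => p.1 == n) ∘ fun m => ((m : Int), (1 : Int))) = (fun m => m == n) from rfl]
    rw [show (Prod.snd ∘ fun (m : Int) => ((m : Int), (1 : Int))) = (fun _ => (1 : Int)) from rfl]
    rw [PySem.List.sum_map_const_int, ← List.countP_eq_length_filter,
      pvMults_countP e i (i * 2) n hi1]
    have hdvd : (i ∣ n - i * 2) ↔ (i ∣ n) := by
      constructor
      · intro h
        have h2 : n = (n - i * 2) + i * 2 := by ring
        rw [h2]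
        exact dvd_add h ⟨2, by ring⟩
      · intro h
        exact dvd_sub h ⟨2, by ring⟩
    by_cases hc : i ∣ n ∧ 2 * i ≤ n
    · rw [if_pos ⟨by omega, hne, hdvd.mpr hc.1⟩, if_pos (by simpa using hc)]
      simp
    · rw [if_neg (by rintro ⟨h1, h2, h3⟩; exact hc ⟨hdvd.mp h3, by omega⟩),
        if_neg (by simpa using hc)]
      simp
  rw [step, PySem.List.sum_map_ite_one_zero]

theorem pvDivSelf (x n : Int) (hx : 2 ≤ x) (hn : 2 ≤ n) (hd : x ∣ n) (hlt : ¬ 2 * x ≤ n) :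
    x = n := by
  have hxn : x ≤ n := Int.le_of_dvd (by omega) hd
  rcases hd with ⟨k, hk⟩
  have hk1 : 1 ≤ k := by nlinarith
  rcases eq_or_lt_of_le hk1 with h1 | h1
  · rw [← h1] at hk
    omega
  · exfalso
    have h2xk : 2 * x ≤ x * k := by nlinarith
    linarith [hk, h2xk, hlt]

theorem pvTauA (e n : Int) (he : 1 ≤ e) (h1 : 1 ≤ n) (hne : n ≤ e) :
    pvTau e n = (if n = 1 then 1 else 2)
      + ((PySem.List.pyRange 2 (e + 1) 1).countP (fun i => decide (i ∣ n ∧ 2 * i ≤ n)) : Int) := by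
  unfold pvTau
  rw [PySem.List.pyRange_one_cons (by omega : (1:Int) < e + 1), List.countP_cons]
  simp only [one_dvd, decide_true, if_true]
  rw [show (1:Int) + 1 = 2 from by norm_num]
  by_cases hn1 : n = 1
  · subst hn1
    have c1 : (PySem.List.pyRange 2 (e + 1) 1).countP (fun d => decide (d ∣ (1:Int))) = 0 := by
      rw [List.countP_eq_zero]
      intro x hx
      rw [PySem.List.mem_pyRange_one] at hx
      simp only [decide_eq_true_eq]
      intro hd
      have := Int.le_of_dvd one_pos hd
      omega
    have c2 : (PySem.List.pyRange 2 (e + 1) 1).countP (fun i => decide (i ∣ (1:Int) ∧ 2 * i ≤ 1)) = 0 := by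
      rw [List.countP_eq_zero]
      intro x hx
      rw [PySem.List.mem_pyRange_one] at hx
      simp only [decide_eq_true_eq]
      rintro ⟨-, h2⟩
      omega
    rw [c1, c2]
    simp
  · have hn2 : 2 ≤ n := by omega
    rw [pvCountP_split (PySem.List.pyRange 2 (e + 1) 1) (fun d => decide (d ∣ n))
      (fun i => decide (2 * i ≤ n))]
    have e1 : (PySem.List.pyRange 2 (e + 1) 1).countP
        (fun x => decide (x ∣ n) && decide (2 * x ≤ n))
        = (PySem.List.pyRange 2 (e + 1) 1).countP (fun i => decide (i ∣ n ∧ 2 * i ≤ n)) := by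
      apply List.countP_congr
      intro x _
      simp
    have e2 : (PySem.List.pyRange 2 (e + 1) 1).countP
        (fun x => decide (x ∣ n) && !decide (2 * x ≤ n)) = 1 := by
      have hcg : (PySem.List.pyRange 2 (e + 1) 1).countP
          (fun x => decide (x ∣ n) && !decide (2 * x ≤ n))
          = (PySem.List.pyRange 2 (e + 1) 1).countP (fun x => x == n) := by
        apply List.countP_congr
        intro x hx
        rw [PySem.List.mem_pyRange_one] at hx
        simp only [Bool.and_eq_true, decide_eq_true_eq, Bool.not_eq_true', decide_eq_false_iff_not,
          beq_iff_eq]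
        constructor
        · rintro ⟨hd, hlt⟩
          exact pvDivSelf x n (by omega) hn2 hd hlt
        · rintro rfl
          exact ⟨dvd_rfl, by omega⟩
      rw [hcg, ← List.count_eq_countP]
      exact List.count_eq_one_of_mem (PySem.List.nodup_pyRange_one 2 (e + 1))
        (PySem.List.mem_pyRange_one.mpr ⟨by omega, by omega⟩)
    rw [e1, e2]
    simp only [if_neg hn1]
    push_cast
    ring

theorem pvYaksu_getD (e n : Int) (he : 1 ≤ e) (h1 : 1 ≤ n) (hne : n ≤ e) :
    PySem.List.pyGetD (pvYaksu e) n 0 = pvTau e n := by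
  rw [pvYaksu_eq]
  have hlen : ((pvBump (PySem.List.pyRepeat [2] (e + 1)) 1 (-1)).length : Int) = e + 1 := by
    rw [pvBump_length, PySem.List.pyRepeat_singleton, List.length_replicate]
    omega
  rw [pvApply_getD _ _ n (by omega) (by omega) (fun p hp => by have := pvEvsA_pos e p hp; omega)]
  rw [pvEvsA_sum e n hne]
  have hinit : PySem.List.pyGetD (pvBump (PySem.List.pyRepeat [2] (e + 1)) 1 (-1)) n 0
      = if n = 1 then 1 else 2 := by
    unfold pvBump
    rw [PySem.List.pyRepeat_singleton,
      PySem.List.pySetD_of_nonneg _ _ (by norm_num : (0:Int) ≤ 1),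
      PySem.List.pyGetD_of_nonneg _ _ (by norm_num : (0:Int) ≤ 1),
      PySem.List.pyGetD_of_nonneg _ _ (by omega : (0:Int) ≤ n)]
    have hlt1 : (1:Int).toNat < (e + 1).toNat := by omega
    have hltn : n.toNat < (e + 1).toNat := by omega
    rw [List.getD_eq_getElem?_getD, List.getD_eq_getElem?_getD]
    by_cases hn1 : n = 1
    · subst hn1
      rw [List.getElem?_set_self (by simpa using hlt1)]
      simp only [List.getElem?_replicate, hlt1, if_pos, Option.getD_some]
      norm_num
    · rw [List.getElem?_set_ne (by omega)]
      simp [List.getElem?_replicate, hltn, List.getD_eq_getElem?_getD, hn1]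
  rw [hinit, pvTauA e n he h1 hne]

theorem pvEvsB_sum (e n : Int) (h1 : 1 ≤ n) (hne : n ≤ e) :
    (((pvEvsB e).filter (fun p => p.1 == n)).map Prod.snd).sum
      = ((PySem.List.pyRange 1 (e + 1) 1).countP (fun d => decide (d ∣ n ∧ d * d = n)) : Int)
        + 2 * ((PySem.List.pyRange 1 (e + 1) 1).countP (fun d => decide (d ∣ n ∧ d * d < n)) : Int) := by
  rw [pvEvsB, pvFlatSum]
  have step : (pvRoots e 1).map
        (fun a => ((((a * a, (1:Int)) :: (PySem.List.pyRange (a + 1) (PySem.Int.floordiv e a + 1) 1).map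
          (fun b => (a * b, (2:Int)))).filter (fun p => p.1 == n)).map Prod.snd).sum)
      = (pvRoots e 1).map
        (fun a => (if decide (a * a = n) then (1:Int) else 0)
          + 2 * (if decide (a ∣ n ∧ a * a < n) then (1:Int) else 0)) := by
    apply List.map_congr_left
    intro a ha
    obtain ⟨ha1, hae⟩ := pvRoots_mem e a ha
    have ha0 : (0:Int) < a := by omega
    -- inner sum over the pairs (a*b, 2)
    have hinner : ((((PySem.List.pyRange (a + 1) (PySem.Int.floordiv e a + 1) 1).map
          (fun b => (a * b, (2:Int)))).filter (fun p => p.1 == n)).map Prod.snd).sum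
        = 2 * (if decide (a ∣ n ∧ a * a < n) then (1:Int) else 0) := by
      rw [List.filter_map, List.map_map]
      rw [show ((fun (p : Int × Int) => p.1 == n) ∘ fun b => ((a * b : Int), (2 : Int)))
          = (fun b => a * b == n) from rfl]
      rw [show (Prod.snd ∘ fun (b : Int) => ((a * b : Int), (2 : Int))) = (fun _ => (2 : Int)) from rfl]
      rw [PySem.List.sum_map_const_int, ← List.countP_eq_length_filter,
        pvInnerCnt a n (a + 1) (PySem.Int.floordiv e a + 1) (by omega)]
      have hcond : (a ∣ n ∧ a + 1 ≤ n / a ∧ n / a < PySem.Int.floordiv e a + 1)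
          ↔ (a ∣ n ∧ a * a < n) := by
        rw [PySem.Int.floordiv_eq_ediv_of_pos ha0]
        constructor
        · rintro ⟨hd, hk1, -⟩
          refine ⟨hd, ?_⟩
          obtain ⟨k, hk⟩ := hd
          have hnk : n / a = k := by rw [hk]; exact Int.mul_ediv_cancel_left k (by omega)
          rw [hnk] at hk1
          nlinarith
        · rintro ⟨hd, hsq⟩
          obtain ⟨k, hk⟩ := hd
          have hnk : n / a = k := by rw [hk]; exact Int.mul_ediv_cancel_left k (by omega)
          refine ⟨⟨k, hk⟩, ?_, ?_⟩
          · rw [hnk]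
            nlinarith
          · rw [hnk]
            have : k ≤ e / a := by
              rw [Int.le_ediv_iff_mul_le ha0]
              nlinarith
            omega
      by_cases hc : a ∣ n ∧ a * a < n
      · rw [if_pos (hcond.mpr hc), if_pos (by simpa using hc)]
        norm_num
      · rw [if_neg (fun hx => hc (hcond.mp hx)), if_neg (by simpa using hc)]
        norm_num
    rw [List.filter_cons]
    by_cases hsq : a * a = n
    · rw [if_pos (show ((a * a, (1:Int)).1 == n) = true by simpa using hsq)]
      simp only [List.map_cons, List.sum_cons]
      rw [hinner, if_pos (show (decide (a * a = n)) = true by simpa using hsq)]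
    · rw [if_neg (show ¬ ((a * a, (1:Int)).1 == n) = true by simpa using hsq)]
      rw [hinner, if_neg (show ¬ (decide (a * a = n)) = true by simpa using hsq)]
      ring
  rw [step]
  rw [show (fun a => (if decide (a * a = n) then (1:Int) else 0)
      + 2 * (if decide (a ∣ n ∧ a * a < n) then (1:Int) else 0))
    = (fun a => (fun a => if decide (a * a = n) then (1:Int) else 0) a
      + (fun a => 2 * (if decide (a ∣ n ∧ a * a < n) then (1:Int) else 0)) a) from rfl]
  rw [PySem.List.sum_map_add_int, PySem.List.sum_map_ite_one_zero, List.sum_map_mul_left,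
    PySem.List.sum_map_ite_one_zero]
  rw [pvRoots_eq e 1 le_rfl, List.countP_filter, List.countP_filter]
  have c1 : (PySem.List.pyRange 1 (e + 1) 1).countP
      (fun a => decide (a * a = n) && decide (a * a ≤ e))
      = (PySem.List.pyRange 1 (e + 1) 1).countP (fun d => decide (d ∣ n ∧ d * d = n)) := by
    apply List.countP_congr
    intro x _
    simp only [Bool.and_eq_true, decide_eq_true_eq]
    constructor
    · rintro ⟨hsq, -⟩
      exact ⟨⟨x, hsq.symm⟩, hsq⟩
    · rintro ⟨-, hsq⟩
      exact ⟨hsq, by omega⟩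
  have c2 : (PySem.List.pyRange 1 (e + 1) 1).countP
      (fun a => decide (a ∣ n ∧ a * a < n) && decide (a * a ≤ e))
      = (PySem.List.pyRange 1 (e + 1) 1).countP (fun d => decide (d ∣ n ∧ d * d < n)) := by
    apply List.countP_congr
    intro x _
    simp only [Bool.and_eq_true, decide_eq_true_eq]
    constructor
    · rintro ⟨hd, -⟩
      exact hd
    · rintro ⟨hd, hsq⟩
      exact ⟨⟨hd, hsq⟩, by omega⟩
  rw [c1, c2]

theorem pvTauB (e n : Int) :
    (PySem.List.pyRange 1 (e + 1) 1).countP (fun d => decide (d ∣ n))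
      = (PySem.List.pyRange 1 (e + 1) 1).countP (fun d => decide (d ∣ n ∧ d * d = n))
        + (PySem.List.pyRange 1 (e + 1) 1).countP (fun d => decide (d ∣ n ∧ d * d < n))
        + (PySem.List.pyRange 1 (e + 1) 1).countP (fun d => decide (d ∣ n ∧ n < d * d)) := by
  rw [pvCountP_split (PySem.List.pyRange 1 (e + 1) 1) (fun d => decide (d ∣ n))
    (fun d => decide (d * d < n))]
  rw [pvCountP_split (PySem.List.pyRange 1 (e + 1) 1)
    (fun d => decide (d ∣ n) && !decide (d * d < n)) (fun d => decide (d * d = n))]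
  have c1 : (PySem.List.pyRange 1 (e + 1) 1).countP
      (fun d => decide (d ∣ n) && decide (d * d < n))
      = (PySem.List.pyRange 1 (e + 1) 1).countP (fun d => decide (d ∣ n ∧ d * d < n)) := by
    apply List.countP_congr; intro x _; simp
  have c2 : (PySem.List.pyRange 1 (e + 1) 1).countP
      (fun d => (decide (d ∣ n) && !decide (d * d < n)) && decide (d * d = n))
      = (PySem.List.pyRange 1 (e + 1) 1).countP (fun d => decide (d ∣ n ∧ d * d = n)) := by
    apply List.countP_congr
    intro x _
    simp only [Bool.and_eq_true, decide_eq_true_eq, Bool.not_eq_true', decide_eq_false_iff_not]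
    constructor
    · rintro ⟨⟨hd, -⟩, he⟩; exact ⟨hd, he⟩
    · rintro ⟨hd, he⟩; exact ⟨⟨hd, by omega⟩, he⟩
  have c3 : (PySem.List.pyRange 1 (e + 1) 1).countP
      (fun d => (decide (d ∣ n) && !decide (d * d < n)) && !decide (d * d = n))
      = (PySem.List.pyRange 1 (e + 1) 1).countP (fun d => decide (d ∣ n ∧ n < d * d)) := by
    apply List.countP_congr
    intro x _
    simp only [Bool.and_eq_true, decide_eq_true_eq, Bool.not_eq_true', decide_eq_false_iff_not]
    constructor
    · rintro ⟨⟨hd, hlt⟩, hne⟩; exact ⟨hd, by omega⟩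
    · rintro ⟨hd, hgt⟩; exact ⟨⟨hd, by omega⟩, by omega⟩
  rw [c1, c2, c3]
  omega

theorem pvD_getD (e n : Int) (he : 1 ≤ e) (h1 : 1 ≤ n) (hne : n ≤ e) :
    PySem.List.pyGetD (pvD e) n 0 = pvTau e n := by
  rw [pvD_eq]
  have hlen : ((PySem.List.pyRepeat [0] (e + 1) : List Int).length : Int) = e + 1 := by
    rw [PySem.List.pyRepeat_singleton, List.length_replicate]
    omega
  rw [pvApply_getD _ _ n (by omega) (by rw [hlen]; omega)
    (fun p hp => by have := pvEvsB_pos e p hp; omega)]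
  have hinit : PySem.List.pyGetD (PySem.List.pyRepeat [0] (e + 1) : List Int) n 0 = 0 := by
    rw [PySem.List.pyRepeat_singleton, PySem.List.pyGetD_of_nonneg _ _ (by omega : (0:Int) ≤ n)]
    simp [List.getD_eq_getElem?_getD, List.getElem?_replicate]
    split <;> rfl
  rw [hinit, pvEvsB_sum e n h1 hne]
  unfold pvTau
  rw [pvTauB e n, ← pvPairs_countP e n h1 hne]
  push_cast
  ring

theorem pvD_getD_zero (e : Int) (he : 1 ≤ e) : PySem.List.pyGetD (pvD e) 0 0 = 0 := by
  rw [pvD_eq]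
  have hlen : ((PySem.List.pyRepeat [0] (e + 1) : List Int).length : Int) = e + 1 := by
    rw [PySem.List.pyRepeat_singleton, List.length_replicate]
    omega
  rw [pvApply_getD _ _ 0 le_rfl (by rw [hlen]; omega)
    (fun p hp => by have := pvEvsB_pos e p hp; omega)]
  have hfil : (pvEvsB e).filter (fun p => p.1 == (0:Int)) = [] := by
    rw [List.filter_eq_nil_iff]
    intro p hp
    have := pvEvsB_pos e p hp
    simp only [beq_iff_eq]
    omega
  rw [hfil]
  simp [PySem.List.pyRepeat_singleton, PySem.List.pyGetD_of_nonneg _ _ (le_refl (0:Int)),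
    List.getD_eq_getElem?_getD, List.getElem?_replicate]
  split <;> rfl

theorem pvSuffix_eq (ys ds : List Int) (e : Int)
    (hagree : ∀ i : Int, 1 ≤ i → i ≤ e → PySem.List.pyGetD ys i 0 = PySem.List.pyGetD ds i 0)
    (h0 : PySem.List.pyGetD ds 0 0 = 0) :
    (pvSuffixA ys e).1 = (pvSuffixB ds e).1 := by
  have main : ∀ (L : List Int), (∀ i ∈ L, 1 ≤ i ∧ i ≤ e) → ∀ (res : List Int) (m : Int),
      L.foldl (fun st i =>
          if st.2.2 ≤ PySem.List.pyGetD ys i 0 then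
            (PySem.List.pySetD st.1 i i, i, PySem.List.pyGetD ys i 0)
          else
            (PySem.List.pySetD st.1 i st.2.1, st.2.1, st.2.2))
        (res, m, PySem.List.pyGetD ds m 0)
      = ((L.foldl (fun st i =>
            if PySem.List.pyGetD ds st.2 0 ≤ PySem.List.pyGetD ds i 0 then
              (PySem.List.pySetD st.1 i i, i)
            else
              (PySem.List.pySetD st.1 i st.2, st.2))
          (res, m)).1,
         (L.foldl (fun st i =>
            if PySem.List.pyGetD ds st.2 0 ≤ PySem.List.pyGetD ds i 0 then
              (PySem.List.pySetD st.1 i i, i)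
            else
              (PySem.List.pySetD st.1 i st.2, st.2))
          (res, m)).2,
         PySem.List.pyGetD ds ((L.foldl (fun st i =>
            if PySem.List.pyGetD ds st.2 0 ≤ PySem.List.pyGetD ds i 0 then
              (PySem.List.pySetD st.1 i i, i)
            else
              (PySem.List.pySetD st.1 i st.2, st.2))
          (res, m)).2) 0) := by
    intro L
    induction L with
    | nil => intro _ res m; rfl
    | cons i t ih =>
      intro hL res m
      have hi := hL i (by simp)
      have hyi : PySem.List.pyGetD ys i 0 = PySem.List.pyGetD ds i 0 := hagree i hi.1 hi.2
      simp only [List.foldl_cons]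
      rw [hyi]
      by_cases hc : PySem.List.pyGetD ds m 0 ≤ PySem.List.pyGetD ds i 0
      · rw [if_pos hc, if_pos hc]
        exact ih (fun j hj => hL j (by simp [hj])) _ i
      · rw [if_neg hc, if_neg hc]
        exact ih (fun j hj => hL j (by simp [hj])) _ m
  unfold pvSuffixA pvSuffixB
  have hL : ∀ i ∈ PySem.List.pyRange e 0 (-1), 1 ≤ i ∧ i ≤ e := by
    intro i hi
    rw [PySem.List.mem_pyRange_neg_one] at hi
    omega
  have := main (PySem.List.pyRange e 0 (-1)) hL (PySem.List.pyRepeat [0] (e + 1)) 0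
  rw [h0] at this
  rw [this]

-- ===== VERDICT (by name: the statement is the Claim_ definition above) =====
theorem solution_spec : Claim_equal_solution := by
  intro e starts _hdom hpre
  unfold Spec_solution solution solution_alt
  rw [PySem.List.foldl_append_singleton_eq_map, List.nil_append]
  have hres : (pvSuffixA (pvYaksu e) e).1 = (pvSuffixB (pvD e) e).1 := by
    apply pvSuffix_eq
    · intro i h1 h2
      rw [pvYaksu_getD e i hpre.1 h1 h2, pvD_getD e i hpre.1 h1 h2]
    · exact pvD_getD_zero e hpre.1
  rw [hres]
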